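-- pv_equiv track=rewrite | github.com/buyuxing/leetcode-cn | python/1bitOr2bitString.py | isEndWith0
-- ===== SOURCE A (Python) =====
-- def isEndWith0(bits):
--     count = len(bits)
--     if bits[count-1] != 0:
--         return False
--     if count == 1:
--         return True
--     r = True
--     i = count - 2
--     while(i >= 0):
--         if bits[i] == 0:
--             break
--         i-=1
--         r = not r
--     return r
-- ===== SOURCE B (Python) =====
-- def isEndWith0(bits):
--     if bits[-1] != 0:
--         return False
--     i = 0
--     n = len(bits)
--     while i < n - 1:
--         i += 2 if bits[i] != 0 else 1
--     return i == n - 1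
-- ===== Notes on version B (the rewrite author's own statement) =====
-- stated objective: alternative
-- what changed: Replaces A's backward parity-toggling scan of the trailing nonzero run with the forward greedy one-/two-bit decode (advance 2 on a nonzero bit, 1 on zero) checking whether decoding lands exactly on the last bit; Pre_ excludes only the empty list, where both raise IndexError.
import Mathlib
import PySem

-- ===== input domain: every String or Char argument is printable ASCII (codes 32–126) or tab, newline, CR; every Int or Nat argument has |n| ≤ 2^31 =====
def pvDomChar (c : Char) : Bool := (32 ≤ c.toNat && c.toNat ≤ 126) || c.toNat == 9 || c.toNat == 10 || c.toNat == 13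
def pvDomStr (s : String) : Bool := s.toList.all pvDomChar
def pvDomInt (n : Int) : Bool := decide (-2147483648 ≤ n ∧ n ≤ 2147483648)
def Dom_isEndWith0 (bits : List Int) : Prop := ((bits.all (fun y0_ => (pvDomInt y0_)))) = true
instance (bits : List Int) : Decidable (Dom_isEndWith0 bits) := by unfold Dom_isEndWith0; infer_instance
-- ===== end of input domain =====

-- B replaces A's backward parity scan of the trailing nonzero run with the forward greedy
-- 1-/2-bit decode; alternative decomposition, same O(n) cost.

-- ===== PORT A =====
-- while(i >= 0): if bits[i] == 0: break; i -= 1; r = not r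
-- (index i satisfies 0 ≤ i < len bits on every call from isEndWith0, so getD 0 is never used)
def isEndWith0Loop (bits : List Int) (i : Int) (r : Bool) : Bool :=
  if h : 0 ≤ i then
    if (PySem.List.pyGet? bits i).getD 0 = 0 then r
    else isEndWith0Loop bits (i - 1) (!r)
  else r
termination_by (i + 1).toNat
decreasing_by omega

def isEndWith0 (bits : List Int) : Bool :=
  let count : Int := bits.length
  match PySem.List.pyGet? bits (count - 1) with
  | none => false    -- IndexError on the empty list; excluded by Pre_
  | some v =>
    if v ≠ 0 then false
    else if count = 1 then true
    else isEndWith0Loop bits (count - 2) true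

-- ===== PORT B =====
-- while i < n - 1: i += 2 if bits[i] != 0 else 1
-- (index i satisfies 0 ≤ i < len bits - 1 on every recursive entry from isEndWith0_alt, so getD 0 is never used)
def altLoop (bits : List Int) (i : Int) : Int :=
  if h : i < (bits.length : Int) - 1 then
    if (PySem.List.pyGet? bits i).getD 0 ≠ 0 then altLoop bits (i + 2)
    else altLoop bits (i + 1)
  else i
termination_by ((bits.length : Int) - i).toNat
decreasing_by all_goals omega

def isEndWith0_alt (bits : List Int) : Bool :=
  match PySem.List.pyGet? bits (-1) with
  | none => false    -- IndexError on the empty list; excluded by Pre_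
  | some v =>
    if v ≠ 0 then false
    else decide (altLoop bits 0 = (bits.length : Int) - 1)

-- ===== PRECONDITION & SPEC =====
-- Pre_ excludes only the empty list, on which A raises IndexError (bits[count-1]).
def Pre_isEndWith0 (bits : List Int) : Prop := bits ≠ []
instance (bits : List Int) : Decidable (Pre_isEndWith0 bits) := by unfold Pre_isEndWith0; infer_instance
def pvWitness_isEndWith0 : List Int := [1, 1, 0]

def Spec_isEndWith0 (bits : List Int) (out : Bool) : Prop := out = isEndWith0_alt bits
instance (bits : List Int) (out : Bool) : Decidable (Spec_isEndWith0 bits out) := by unfold Spec_isEndWith0; infer_instance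

-- ===== CLAIM (what is proved, stated in full; the proofs are below) =====
def Claim_equal_isEndWith0 : Prop := ∀ (bits : List Int), Dom_isEndWith0 bits → Pre_isEndWith0 bits → Spec_isEndWith0 bits (isEndWith0 bits)

-- ===== LEMMAS AND PROOFS =====

-- forward greedy decode as a structural recursion on the list
def decFwd : List Int → Bool
  | [] => false
  | [_] => true
  | x :: y :: t => if x ≠ 0 then decFwd t else decFwd (y :: t)
termination_by l => l.length

-- A's backward scan as a function of the reversed prefix
def backScan : List Int → Bool → Bool
  | [], r => r
  | x :: t, r => if x = 0 then r else backScan t (!r)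

theorem dec_nonzero (s : List Int) (h : ∀ x ∈ s, x ≠ 0) :
    decFwd (s ++ [0]) = decide (s.length % 2 = 0) := by
  match s with
  | [] => simp [decFwd]
  | [x] =>
    have hx : x ≠ 0 := h x (by simp)
    simp [decFwd, hx]
  | x :: y :: s' =>
    have hx : x ≠ 0 := h x (by simp)
    have ih := dec_nonzero s' (fun z hz => h z (by simp [hz]))
    have hm : (s'.length + 1 + 1) % 2 = s'.length % 2 := by omega
    simp only [List.cons_append, decFwd, hx, ih, List.length_cons, hm, ne_eq,
      not_false_eq_true, if_true]
termination_by s.length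

theorem dec_resync (p t : List Int) (ht : t ≠ []) :
    decFwd (p ++ 0 :: t) = decFwd t := by
  match p with
  | [] =>
    obtain ⟨z, t', rfl⟩ := List.exists_cons_of_ne_nil ht
    simp [decFwd]
  | [x] =>
    obtain ⟨z, t', rfl⟩ := List.exists_cons_of_ne_nil ht
    by_cases hx : x = 0 <;> simp [decFwd, hx]
  | x :: y :: p' =>
    have ih1 := dec_resync p' t ht
    have ih2 := dec_resync (y :: p') t ht
    by_cases hx : x = 0
    · simp only [List.cons_append] at ih2 ⊢
      simp [decFwd, hx, ih2]
    · simp only [List.cons_append] at ih1 ⊢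
      simp [decFwd, hx, ih1]
termination_by p.length

theorem loopA_backScan (bits : List Int) (j : Nat) (r : Bool) (h : j < bits.length) :
    isEndWith0Loop bits (j : Int) r = backScan ((bits.take (j + 1)).reverse) r := by
  induction j generalizing r with
  | zero =>
    rw [isEndWith0Loop]
    have h0 : PySem.List.pyGet? bits (0 : Int) = some bits[0] := by
      simpa using PySem.List.pyGet?_ofNat (xs := bits) (n := 0) h
    have ht : bits.take 1 = [bits[0]] := by
      cases bits with
      | nil => simp at h
      | cons a t => simp
    by_cases hb : bits[0] = 0 <;>
      simp [h0, hb, ht, backScan, isEndWith0Loop]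
  | succ j' ih =>
    rw [isEndWith0Loop]
    have h0 : PySem.List.pyGet? bits ((j' + 1 : Nat) : Int) = some bits[j' + 1] := by
      simpa using PySem.List.pyGet?_ofNat (xs := bits) (n := j' + 1) h
    have htake : (bits.take (j' + 1 + 1)).reverse
        = bits[j' + 1] :: (bits.take (j' + 1)).reverse := by
      rw [List.take_add_one]
      simp [List.getElem?_eq_getElem h]
    have hcast : ((j' + 1 : Nat) : Int) - 1 = (j' : Int) := by push_cast; ring
    rw [dif_pos (by positivity : (0:Int) ≤ ((j' + 1 : Nat) : Int)), h0]
    simp only [Option.getD_some]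
    by_cases hb : bits[j' + 1] = 0
    · rw [if_pos hb, htake]
      simp [backScan, hb]
    · rw [if_neg hb, hcast, ih (!r) (by omega), htake]
      simp [backScan, hb]

theorem altLoop_dec (bits : List Int) (j : Nat) (h : j ≤ bits.length) :
    altLoop bits (j : Int) =
      (if decFwd (bits.drop j) then ((bits.length : Int) - 1) else (bits.length : Int)) := by
  rw [altLoop]
  by_cases hlt : (j : Int) < (bits.length : Int) - 1
  · have hj1 : j + 1 < bits.length := by omega
    have hget : PySem.List.pyGet? bits ((j : Nat) : Int) = some bits[j] := by
      exact PySem.List.pyGet?_ofNat (xs := bits) (n := j) (by omega)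
    have hdrop : bits.drop j = bits[j] :: bits[j+1] :: bits.drop (j + 2) := by
      rw [List.drop_eq_getElem_cons (by omega), List.drop_eq_getElem_cons hj1]
    rw [dif_pos hlt, hget]
    simp only [Option.getD_some, ne_eq]
    by_cases hb : bits[j] = 0
    · have ih := altLoop_dec bits (j + 1) (by omega)
      have hd1 : bits.drop (j + 1) = bits[j+1] :: bits.drop (j + 2) :=
        List.drop_eq_getElem_cons hj1
      have hdec : decFwd (bits.drop j) = decFwd (bits.drop (j + 1)) := by
        rw [hdrop, hd1]
        simp only [decFwd, hb, ne_eq, not_true_eq_false, if_false]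
      rw [if_neg (by simp [hb]),
        show (j : Int) + 1 = ((j + 1 : Nat) : Int) by push_cast; ring, ih, hdec]
    · have ih := altLoop_dec bits (j + 2) (by omega)
      have hdec : decFwd (bits.drop j) = decFwd (bits.drop (j + 2)) := by
        rw [hdrop]
        simp only [decFwd, hb, ne_eq, not_false_eq_true, if_true]
      rw [if_pos (by simp [hb]),
        show (j : Int) + 2 = ((j + 2 : Nat) : Int) by push_cast; ring, ih, hdec]
  · have hj : j = bits.length ∨ j + 1 = bits.length := by omega
    rcases hj with hj | hj
    · simp [hj, decFwd]
    · have hd : bits.drop j = [bits[j]] := by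
        have := List.drop_eq_getElem_cons (l := bits) (i := j) (by omega)
        simpa [hj] using this
      simp [hlt, hd, decFwd]
      omega
termination_by bits.length - j

theorem backScan_append (run rest : List Int) (r : Bool) (h : ∀ x ∈ run, x ≠ 0) :
    backScan (run ++ rest) r = backScan rest (xor r (decide (run.length % 2 = 1))) := by
  induction run generalizing r with
  | nil => simp
  | cons x t ih =>
    have hx : x ≠ 0 := h x (by simp)
    rw [List.cons_append, backScan.eq_def]
    simp only [hx, ite_false, ih (!r) (fun z hz => h z (by simp [hz])), List.length_cons]
    congr 1
    rcases Nat.even_or_odd t.length with he | ho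
    · have : t.length % 2 = 0 := Nat.even_iff.mp he
      simp [this, Nat.add_mod, Bool.xor_comm]
    · have : t.length % 2 = 1 := Nat.odd_iff.mp ho
      simp [this, Nat.add_mod]

theorem parity_bool (k : Nat) : xor true (decide (k % 2 = 1)) = decide (k % 2 = 0) := by
  rcases Nat.even_or_odd k with he | ho
  · have h0 : k % 2 = 0 := Nat.even_iff.mp he
    simp [h0]
  · have h1 : k % 2 = 1 := Nat.odd_iff.mp ho
    simp [h1]

-- the two scans agree on a list ending in 0: both compute the parity of the trailing nonzero run
theorem dec_concat_zero (ys : List Int) :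
    decFwd (ys ++ [0]) = backScan ys.reverse true := by
  obtain ⟨run, rest, hsplit, hrun, hrest⟩ :
      ∃ run rest, ys.reverse = run ++ rest ∧ (∀ x ∈ run, x ≠ 0) ∧
        (rest = [] ∨ ∃ t, rest = 0 :: t) := by
    refine ⟨ys.reverse.takeWhile (fun x => x != 0), ys.reverse.dropWhile (fun x => x != 0),
      List.takeWhile_append_dropWhile.symm, ?_, ?_⟩
    · intro x hx
      have := List.mem_takeWhile_imp hx
      simpa using this
    · cases hd : ys.reverse.dropWhile (fun x => x != 0) with
      | nil => exact Or.inl rfl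
      | cons a t =>
        right
        have hne : ys.reverse.dropWhile (fun x => x != 0) ≠ [] := by simp [hd]
        have hh := List.head_dropWhile_not (fun x => x != 0) hne
        have ha : a = 0 := by
          have : ((ys.reverse.dropWhile (fun x => x != 0)).head hne) = a := by
            simp [hd]
          rw [this] at hh
          simpa using hh
        exact ⟨t, by rw [ha]⟩
  have hys : ys = rest.reverse ++ run.reverse := by
    have := congrArg List.reverse hsplit
    simpa using this
  have hrunrev : ∀ x ∈ run.reverse, x ≠ 0 := fun x hx => hrun x (List.mem_reverse.mp hx)
  have hdec : decFwd (ys ++ [0]) = decide (run.length % 2 = 0) := by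
    rcases hrest with rfl | ⟨t, rfl⟩
    · rw [hys]
      simp only [List.reverse_nil, List.nil_append]
      rw [dec_nonzero _ hrunrev]
      simp
    · rw [hys]
      have hshape : ((0 :: t).reverse ++ run.reverse) ++ [0]
          = t.reverse ++ 0 :: (run.reverse ++ [0]) := by simp
      rw [hshape, dec_resync _ _ (by simp), dec_nonzero _ hrunrev]
      simp
  have hA : backScan ys.reverse true = decide (run.length % 2 = 0) := by
    rw [hsplit, backScan_append _ _ _ hrun, parity_bool]
    rcases hrest with rfl | ⟨t, rfl⟩ <;> simp [backScan]
  rw [hdec, hA]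

theorem main_eq (bits : List Int) (hpre : bits ≠ []) :
    isEndWith0 bits = isEndWith0_alt bits := by
  obtain ⟨ys, z, rfl⟩ := (List.eq_nil_or_concat' bits).resolve_left hpre
  have hgetA : PySem.List.pyGet? (ys ++ [z]) (((ys ++ [z]).length : Int) - 1) = some z := by
    have h1 : ((ys ++ [z]).length : Int) - 1 = ((ys.length : Nat) : Int) := by simp
    rw [h1]
    exact PySem.List.pyGet?_append_length (pre := ys) (y := z) (ys := [])
  have hgetB : PySem.List.pyGet? (ys ++ [z]) (-1) = some z :=
    PySem.List.pyGet?_neg_one_append_singleton ys z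
  simp only [isEndWith0, isEndWith0_alt, hgetA, hgetB]
  by_cases hz : z = 0
  · subst hz
    simp only [ne_eq, not_true_eq_false, if_false]
    have h0 := altLoop_dec (ys ++ [0]) 0 (by simp)
    have hc0 : ((0 : Nat) : Int) = 0 := by norm_num
    rw [hc0] at h0
    simp only [List.drop_zero] at h0
    have hB : decide (altLoop (ys ++ [0]) 0 = ((ys ++ [0]).length : Int) - 1)
        = decFwd (ys ++ [0]) := by
      rw [h0]
      by_cases hd : decFwd (ys ++ [0])
      · simp [hd]
      · simp only [hd, Bool.false_eq_true, if_false]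
        simp only [decide_eq_false_iff_not]
        intro hcontra
        omega
    cases ys with
    | nil =>
      simp only [List.nil_append] at h0 hB ⊢
      rw [if_pos (by norm_num), hB]
      simp [decFwd]
    | cons w ys' =>
      have hcount : ¬ (((w :: ys' ++ [0]).length : Int) = 1) := by
        simp only [List.cons_append, List.length_append, List.length_cons, List.length_nil]
        push_cast
        omega
      rw [if_neg hcount, hB]
      have hj : (((w :: ys' ++ [0]).length : Int) - 2)
          = (((w :: ys').length - 1 : Nat) : Int) := by
        simp
        omega
      have hlt : (w :: ys').length - 1 < (w :: ys' ++ [0]).length := by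
        simp
      rw [hj, loopA_backScan _ _ _ hlt]
      have htk : (w :: ys').length - 1 + 1 = (w :: ys').length := by simp
      rw [htk, ← dec_concat_zero]
      have : (w :: ys' ++ [0]).take (w :: ys').length = w :: ys' := by
        exact List.take_left (l₁ := w :: ys') (l₂ := [(0 : Int)])
      rw [this]
  · simp [hz]

theorem isEndWith0_spec : Claim_equal_isEndWith0 :=
  fun bits _ hpre => main_eq bits hpre
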